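-- pv_equiv track=rewrite | github.com/STEMWizard/Solutions-to-challenges | Recurring item in list.py | is_reoccuring
-- ===== SOURCE A (Python) =====
-- def is_reoccuring(items):
--     sequence_numbers = []
--     for index, item in enumerate(items):
--         for number in sequence_numbers:
--             if item == number and items[index - 1] != item:
--                 return True
--         if index == 0:
--             sequence_numbers.append(item)
--             continue
--         elif item not in sequence_numbers:
--             sequence_numbers.append(item)
--     return False
-- ===== SOURCE B (Python) =====
-- def is_reoccuring(items):
--     # Pass 1: run-length compress (drop adjacent duplicates).
--     compressed = []
--     for x in items:
--         if not compressed or compressed[-1] != x: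
--             compressed.append(x)
--     # Pass 2: any duplicate in the compressed list is a non-adjacent reoccurrence.
--     earlier = []
--     for x in compressed:
--         if x in earlier:
--             return True
--         earlier.append(x)
--     return False
-- ===== Notes on version B (the rewrite author's own statement) =====
-- stated objective: alternative
-- what changed: Replaces A's single-pass seen-set-plus-previous-element check (with its items[index-1] wraparound read) by a two-phase transform: run-length-compress the list, then detect any duplicate in the compressed copy.
import Mathlib
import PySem

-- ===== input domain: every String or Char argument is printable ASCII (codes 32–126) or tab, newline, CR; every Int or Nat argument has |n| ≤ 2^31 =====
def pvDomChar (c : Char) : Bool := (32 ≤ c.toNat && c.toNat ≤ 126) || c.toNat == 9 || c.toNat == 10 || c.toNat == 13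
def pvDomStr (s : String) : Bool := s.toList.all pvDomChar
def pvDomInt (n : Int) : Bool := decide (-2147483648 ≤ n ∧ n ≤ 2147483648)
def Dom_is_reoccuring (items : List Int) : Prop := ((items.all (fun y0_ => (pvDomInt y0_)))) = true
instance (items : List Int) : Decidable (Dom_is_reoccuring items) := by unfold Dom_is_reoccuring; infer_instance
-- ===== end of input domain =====

-- B replaces A's single-pass seen-list-plus-previous-element check by
-- run-length compression followed by a duplicate scan (alternative algorithm, similar cost).

-- ===== PORT A =====
-- A's for-loop over enumerate(items), carrying sequence_numbers; the inner
-- 'for number in sequence_numbers: if item == number and items[index-1] != item: return True'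
-- is the List.any; items[index-1] is PySem.List.pyGet? (negative index wraps).
def aGo (items : List Int) : List Int → Nat → List Int → Bool
  | [], _, _ => false
  | item :: rest, idx, seq =>
    if seq.any (fun number => item == number &&
        decide (PySem.List.pyGet? items ((idx : Int) - 1) ≠ some item)) then
      true
    else if idx == 0 then aGo items rest (idx + 1) (seq ++ [item])
    else if !(seq.contains item) then aGo items rest (idx + 1) (seq ++ [item])
    else aGo items rest (idx + 1) seq

def is_reoccuring (items : List Int) : Bool := aGo items items 0 []

-- ===== PORT B =====
-- Source B pass 1: compressed.append(x) unless compressed[-1] == x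
def bCompress (xs : List Int) : List Int :=
  xs.foldl (fun acc x =>
    if acc = [] ∨ PySem.List.pyGet? acc (-1) ≠ some x then acc ++ [x] else acc) []

-- Source B pass 2: 'if x in earlier: return True; earlier.append(x)'
def bScan : List Int → List Int → Bool
  | _, [] => false
  | earlier, x :: rest => if earlier.contains x then true else bScan (earlier ++ [x]) rest

def is_reoccuring_alt (items : List Int) : Bool := bScan [] (bCompress items)

-- ===== PRECONDITION & SPEC =====
def Spec_is_reoccuring (items : List Int) (out : Bool) : Prop := out = is_reoccuring_alt items
instance (items : List Int) (out : Bool) : Decidable (Spec_is_reoccuring items out) := by unfold Spec_is_reoccuring; infer_instance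

-- ===== CLAIM (what is proved, stated in full; the proofs are below) =====
def Claim_equal_is_reoccuring : Prop := ∀ (items : List Int), Dom_is_reoccuring items → Spec_is_reoccuring items (is_reoccuring items)

-- ===== LEMMAS AND PROOFS =====

-- compression continuation: compress 'rest' given the previously kept value 'prev'
def ct (prev : Int) : List Int → List Int
  | [] => []
  | x :: r => if x = prev then ct prev r else x :: ct x r

theorem bCompress_foldl_eq (rest : List Int) : ∀ (acc : List Int) (prev : Int),
    acc.getLast? = some prev →
    List.foldl (fun acc x =>
      if acc = [] ∨ PySem.List.pyGet? acc (-1) ≠ some x then acc ++ [x] else acc) acc rest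
      = acc ++ ct prev rest := by
  induction rest with
  | nil => intro acc prev _; simp [ct]
  | cons x r ih =>
    intro acc prev hlast
    have hne : acc ≠ [] := by intro h; simp [h] at hlast
    by_cases hx : x = prev
    · have hstep : (if acc = [] ∨ PySem.List.pyGet? acc (-1) ≠ some x then acc ++ [x] else acc)
          = acc := by
        rw [if_neg]
        push Not
        refine ⟨hne, ?_⟩
        rw [PySem.List.pyGet?_neg_one, hlast, hx]
      rw [List.foldl_cons, hstep, ih acc prev hlast]
      have : ct prev (x :: r) = ct prev r := by rw [ct, if_pos hx]
      rw [this]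
    · have hstep : (if acc = [] ∨ PySem.List.pyGet? acc (-1) ≠ some x then acc ++ [x] else acc)
          = acc ++ [x] := by
        rw [if_pos]
        right
        rw [PySem.List.pyGet?_neg_one, hlast]
        intro h
        exact hx (Option.some.inj h).symm
      rw [List.foldl_cons, hstep, ih (acc ++ [x]) x (by simp)]
      have : ct prev (x :: r) = x :: ct x r := by rw [ct, if_neg hx]
      rw [this]
      simp

theorem pyGet_prev (p rest : List Int) (prev : Int) (hlast : p.getLast? = some prev) :
    PySem.List.pyGet? (p ++ rest) ((p.length : Int) - 1) = some prev := by
  have hne : p ≠ [] := by intro h; simp [h] at hlast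
  have hpos : 1 ≤ p.length := List.length_pos_iff.mpr hne
  have hcast : ((p.length : Int) - 1) = ((p.length - 1 : Nat) : Int) := by omega
  rw [hcast, PySem.List.pyGet?_natCast]
  rw [List.getElem?_append_left (by omega)]
  rw [← List.getLast?_eq_getElem?]
  exact hlast

theorem main_lemma (rest : List Int) : ∀ (p seq c : List Int) (prev : Int),
    p.getLast? = some prev →
    (∀ x : Int, x ∈ seq ↔ x ∈ c) →
    prev ∈ seq →
    aGo (p ++ rest) rest p.length seq = bScan c (ct prev rest) := by
  induction rest with
  | nil => intro p seq c prev _ _ _; simp [aGo, bScan, ct]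
  | cons item r ih =>
    intro p seq c prev hlast hm hprev
    have hne : p ≠ [] := by intro h; simp [h] at hlast
    have hlen : (p.length == 0) = false := by simp [List.length_eq_zero_iff, hne]
    have hget := pyGet_prev p (item :: r) prev hlast
    have happ : p ++ item :: r = (p ++ [item]) ++ r := by simp
    have hlen' : p.length + 1 = (p ++ [item]).length := by simp
    by_cases hip : item = prev
    · subst hip
      have hany : (seq.any (fun number => item == number &&
          decide (PySem.List.pyGet? (p ++ item :: r) ((p.length : Int) - 1) ≠ some item))) = false := by
        rw [hget]
        simp
      have hseq : seq.contains item = true := by simp [hprev]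
      have hct : ct item (item :: r) = ct item r := by rw [ct, if_pos rfl]
      simp only [aGo, hany, hseq, hlen, Bool.not_true, Bool.false_eq_true, if_false, hct]
      rw [happ, hlen']
      exact ih (p ++ [item]) seq c item (by simp) hm hprev
    · have hprevne : ¬ prev = item := fun h => hip h.symm
      have hct : ct prev (item :: r) = item :: ct item r := by rw [ct, if_neg hip]
      by_cases hc : item ∈ c
      · have hseq : item ∈ seq := (hm item).mpr hc
        have hany : (seq.any (fun number => item == number &&
            decide (PySem.List.pyGet? (p ++ item :: r) ((p.length : Int) - 1) ≠ some item))) = true := by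
          rw [hget]
          simp only [List.any_eq_true]
          exact ⟨item, hseq, by simp [hprevne]⟩
        simp only [aGo, hany, if_pos]
        rw [hct]
        simp [bScan, hc]
      · have hseq : item ∉ seq := fun h => hc ((hm item).mp h)
        have hany : (seq.any (fun number => item == number &&
            decide (PySem.List.pyGet? (p ++ item :: r) ((p.length : Int) - 1) ≠ some item))) = false := by
          rw [hget]
          simp only [List.any_eq_false]
          intro x hx
          simp only [Bool.and_eq_true, beq_iff_eq, not_and]
          intro hxe
          exact absurd (hxe ▸ hx) hseq
        have hcont : seq.contains item = false := by simp [hseq]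
        have hccont : c.contains item = false := by simp [hc]
        simp only [aGo, hany, hcont, hlen, Bool.not_false, Bool.false_eq_true, if_false, if_true, hct]
        simp only [bScan, hccont, Bool.false_eq_true, if_false]
        rw [happ, hlen']
        refine ih (p ++ [item]) (seq ++ [item]) (c ++ [item]) item (by simp) ?_ (by simp)
        intro x
        simp [hm x]

-- ===== VERDICT (by name: the statement is the Claim_ definition above) =====
theorem is_reoccuring_spec : Claim_equal_is_reoccuring := by
  intro items _
  unfold Spec_is_reoccuring is_reoccuring is_reoccuring_alt
  cases items with
  | nil => simp [aGo, bCompress, bScan]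
  | cons y t =>
    have hc : bCompress (y :: t) = [y] ++ ct y t := by
      unfold bCompress
      rw [List.foldl_cons]
      have h0 : (if ([] : List Int) = [] ∨ PySem.List.pyGet? ([] : List Int) (-1) ≠ some y
          then ([] : List Int) ++ [y] else []) = [y] := by simp
      rw [h0]
      exact bCompress_foldl_eq t [y] y (by simp)
    rw [hc]
    have hA : aGo (y :: t) (y :: t) 0 [] = aGo (y :: t) t 1 [y] := by
      simp [aGo]
    have hB : bScan [] ([y] ++ ct y t) = bScan [y] (ct y t) := by
      simp [bScan]
    rw [hA, hB]
    have := main_lemma t [y] [y] [y] y (by simp) (fun x => Iff.rfl) (by simp)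
    simpa using this
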